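-- pv_equiv track=rewrite | github.com/Aghon5304/pp1 | 05-Test1/mock/p3.py | f
-- ===== SOURCE A (Python) =====
-- def f(zdanie):
--     result=""+zdanie[0]
--     poprzednia_litera='_'
--     for x in zdanie:
--         if poprzednia_litera==" " and x!=" ":
--             result+=x
--         poprzednia_litera=x
--     return result
-- ===== SOURCE B (Python) =====
-- def f(zdanie):
--     parts = zdanie.split(" ")
--     result = zdanie[0]
--     for part in parts[1:]:
--         if part:
--             result += part[0]
--     return result
-- ===== Notes on version B (the rewrite author's own statement) =====
-- stated objective: faster
-- what changed: Replaces A's Python-level char-by-char previous-character state machine with a word-level pass: split the sentence into space-separated tokens (C-level str.split) and take the first letter of each non-empty token after the first.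
import Mathlib
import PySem

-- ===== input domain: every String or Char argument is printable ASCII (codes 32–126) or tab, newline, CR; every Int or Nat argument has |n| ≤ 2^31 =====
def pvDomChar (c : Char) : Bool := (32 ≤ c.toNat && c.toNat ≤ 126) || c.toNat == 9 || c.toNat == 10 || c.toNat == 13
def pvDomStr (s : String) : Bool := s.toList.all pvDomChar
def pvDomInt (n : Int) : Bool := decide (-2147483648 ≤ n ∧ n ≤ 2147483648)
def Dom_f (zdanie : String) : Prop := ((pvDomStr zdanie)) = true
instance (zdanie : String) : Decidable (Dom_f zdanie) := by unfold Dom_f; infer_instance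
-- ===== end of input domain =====

-- B replaces A's char-by-char previous-character state machine by a word-level pass over
-- zdanie.split(" "): an alternative decomposition of the same O(n) task.

-- ===== PORT A =====
-- A: result = "" + zdanie[0]; prev = '_'; for x in zdanie: if prev == " " and x != " ": result += x; prev = x
def f (zdanie : String) : String :=
  match PySem.Str.pyGet? zdanie 0 with
  | none => ""          -- zdanie[0] raises IndexError on the empty string; excluded by Pre_f
  | some c0 =>
    let st := zdanie.toList.foldl
      (fun (st : List Char × Char) x =>
        (if st.2 = ' ' ∧ x ≠ ' ' then st.1 ++ [x] else st.1, x))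
      ([c0], '_')
    String.mk st.1

-- ===== PORT B =====
-- B: parts = zdanie.split(" "); result = zdanie[0]; for part in parts[1:]: if part: result += part[0]
def f_alt (zdanie : String) : String :=
  let parts := PySem.Chars.splitOn zdanie.toList [' ']
  match PySem.Str.pyGet? zdanie 0 with
  | none => ""          -- zdanie[0] raises IndexError on the empty string; excluded by Pre_f
  | some c0 =>
    String.mk ((parts.drop 1).foldl
      (fun acc part =>
        match part with
        | [] => acc          -- 'if part:' fails
        | c :: _ => acc ++ [c])
      [c0])

-- ===== PRECONDITION & SPEC =====
-- Pre_f excludes only the empty string, on which both Pythons raise IndexError at zdanie[0].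
def Pre_f (zdanie : String) : Prop := zdanie ≠ ""
instance (zdanie : String) : Decidable (Pre_f zdanie) := by unfold Pre_f; infer_instance
def pvWitness_f : String := "ala ma  kota"
def Spec_f (zdanie : String) (out : String) : Prop := out = f_alt zdanie
instance (zdanie : String) (out : String) : Decidable (Spec_f zdanie out) := by unfold Spec_f; infer_instance

-- ===== CLAIM (what is proved, stated in full; the proofs are below) =====
def Claim_equal_f : Prop := ∀ (zdanie : String), Dom_f zdanie → Pre_f zdanie → Spec_f zdanie (f zdanie)

-- ===== LEMMAS AND PROOFS =====

-- the chars A's loop appends after the initial one, starting with previous character p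
def aTail (p : Char) : List Char → List Char
  | [] => []
  | x :: cs => (if p = ' ' ∧ x ≠ ' ' then [x] else []) ++ aTail x cs

-- clean structural recursion equal to PySem.Chars.splitOn · [' ']
def mySplit : List Char → List (List Char)
  | [] => [[]]
  | c :: cs =>
    if c = ' ' then [] :: mySplit cs
    else
      match mySplit cs with
      | [] => [[c]]
      | t :: ts => (c :: t) :: ts

-- first letters of the non-empty tokens
def firsts : List (List Char) → List Char
  | [] => []
  | [] :: ps => firsts ps
  | (c :: _) :: ps => c :: firsts ps

theorem mySplit_ne_nil (cs : List Char) : mySplit cs ≠ [] := by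
  cases cs with
  | nil => simp [mySplit]
  | cons c cs =>
    simp only [mySplit]
    split
    · simp
    · split <;> simp_all

theorem go_eq : ∀ (fuel : Nat) (cs cur : List Char) (acc : List (List Char)),
    cs.length < fuel →
    PySem.Chars.splitOn.go [' '] fuel cs cur acc =
      acc.reverse ++ (match mySplit cs with
        | [] => []
        | t :: ts => (cur.reverse ++ t) :: ts) := by
  intro fuel
  induction fuel with
  | zero => intro cs cur acc h; omega
  | succ n ih =>
    intro cs cur acc h
    cases cs with
    | nil =>
      simp [PySem.Chars.splitOn.go, mySplit]
    | cons c rest =>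
      simp only [List.length_cons] at h
      by_cases hc : c = ' '
      · subst hc
        have hstep : PySem.Chars.splitOn.go [' '] (n+1) (' ' :: rest) cur acc =
            PySem.Chars.splitOn.go [' '] n rest [] (cur.reverse :: acc) := by
          rw [PySem.Chars.splitOn.go]; simp [List.isPrefixOf]
        rw [hstep, ih rest [] (cur.reverse :: acc) (by omega)]
        simp only [mySplit, if_pos rfl]
        rcases hs : mySplit rest with _ | ⟨t, ts⟩
        · exact absurd hs (mySplit_ne_nil rest)
        · simp
      · have hstep : PySem.Chars.splitOn.go [' '] (n+1) (c :: rest) cur acc =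
            PySem.Chars.splitOn.go [' '] n rest (c :: cur) acc := by
          rw [PySem.Chars.splitOn.go]; simp [List.isPrefixOf]
          intro h'; exact absurd h'.symm hc
        rw [hstep, ih rest (c :: cur) acc (by omega)]
        simp only [mySplit, if_neg hc]
        rcases hs : mySplit rest with _ | ⟨t, ts⟩
        · exact absurd hs (mySplit_ne_nil rest)
        · simp

theorem splitOn_eq_mySplit (cs : List Char) :
    PySem.Chars.splitOn cs [' '] = mySplit cs := by
  have h := go_eq (cs.length + 1) cs [] [] (by omega)
  rcases hs : mySplit cs with _ | ⟨t, ts⟩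
  · exact absurd hs (mySplit_ne_nil cs)
  · simpa [PySem.Chars.splitOn, hs] using h

-- the joint characterisation: firsts of the split vs A's state machine
theorem firsts_mySplit (cs : List Char) :
    firsts (mySplit cs) = aTail ' ' cs ∧
      ∀ p : Char, p ≠ ' ' → firsts ((mySplit cs).drop 1) = aTail p cs := by
  induction cs with
  | nil => constructor <;> simp [mySplit, firsts, aTail]
  | cons c rest ih =>
    by_cases hc : c = ' '
    · subst hc
      constructor
      · simpa [mySplit, firsts, aTail] using ih.1
      · intro p hp
        simpa [mySplit, firsts, aTail, hp] using ih.1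
    · rcases hs : mySplit rest with _ | ⟨t, ts⟩
      · exact absurd hs (mySplit_ne_nil rest)
      · have h2 := ih.2 c hc
        rw [hs] at h2
        simp only [List.drop_one, List.tail_cons] at h2
        constructor
        · simp [mySplit, hs, if_neg hc, firsts, aTail, hc, h2]
        · intro p hp
          simp [mySplit, hs, if_neg hc, firsts, aTail, hp, hc]
          exact h2

-- A's foldl unrolled to aTail
theorem foldlA (cs : List Char) : ∀ (r : List Char) (p : Char),
    (cs.foldl (fun (st : List Char × Char) x =>
        (if st.2 = ' ' ∧ x ≠ ' ' then st.1 ++ [x] else st.1, x)) (r, p)).1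
      = r ++ aTail p cs := by
  induction cs with
  | nil => intro r p; simp [aTail]
  | cons x cs ih =>
    intro r p
    simp only [List.foldl_cons, aTail]
    by_cases h : p = ' ' ∧ x ≠ ' '
    · simp [h, ih]
    · simp [h, ih, if_neg h]

-- B's foldl unrolled to firsts
theorem foldlB (parts : List (List Char)) : ∀ (acc : List Char),
    parts.foldl (fun acc part =>
        match part with
        | [] => acc
        | c :: _ => acc ++ [c]) acc = acc ++ firsts parts := by
  induction parts with
  | nil => intro acc; simp [firsts]
  | cons p ps ih =>
    intro acc
    cases p with
    | nil => simp [firsts, ih]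
    | cons c cs => simp [firsts, ih]

-- ===== VERDICT (by name: the statement is the Claim_ definition above) =====
theorem f_spec : Claim_equal_f := by
  intro zdanie _ hpre
  unfold Spec_f f f_alt
  cases hg : PySem.Str.pyGet? zdanie 0 with
  | none =>
    -- impossible under Pre_f: zdanie ≠ "" means zdanie[0] exists
    exfalso
    rw [show (0 : Int) = ((0 : Nat) : Int) from rfl, PySem.Str.pyGet?_natCast] at hg
    have : zdanie.toList = [] := by
      cases hl : zdanie.toList with
      | nil => rfl
      | cons a l => rw [hl] at hg; simp at hg
    exact hpre (String.toList_eq_nil_iff.mp this)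
  | some c0 =>
    simp only
    rw [foldlA, foldlB, splitOn_eq_mySplit]
    have h := (firsts_mySplit zdanie.toList).2 '_' (by decide)
    rw [h]
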